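-- pv_equiv track=rewrite | github.com/ihdarsyd/SentimentAnalysis | model/categorizer/categorizer.py | characterChecker
-- ===== SOURCE A (Python) =====
-- def characterChecker(data, query):
--     temp = data
--     if len(data) < len(query):
--         data = query
--         query = temp
--
--     count = 0
--     flag = 0
--     tempdiffer = -1
--     differ = 0
--     tempidx = -1
--     target = 0
--     for idx, char in enumerate(data):
--         found = query.find(char, target)
--         target = found if found != -1 else query.find(char)
--
--         if target == -1:
--             count += 5
--             flag = 0
--             continue
--         differ = idx - target
--         if abs(differ) >= 1:
--             count += 3
--         if tempdiffer == differ or target >= ((idx-1)-tempdiffer):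
--             flag += 1
--         else:
--             flag = 0
--         tempdiffer = differ
--         count += abs(differ)
--         if flag >= (0.8*len(temp)): return 0
--     return count
-- ===== SOURCE B (Python) =====
-- from bisect import bisect_left
--
--
-- def characterChecker(data, query):
--     temp = data
--     if len(data) < len(query):
--         data = query
--         query = temp
--
--     # index the (shorter) string once: char -> sorted list of its positions
--     pos = {}
--     for j, c in enumerate(query):
--         pos.setdefault(c, []).append(j)
--
--     count = 0
--     flag = 0
--     tempdiffer = -1
--     target = 0
--     for idx, char in enumerate(data):
--         lst = pos.get(char)
--         if lst is None:
--             count += 5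
--             flag = 0
--             target = -1
--             continue
--         # first occurrence at index >= start (str.find treats a negative start
--         # as counting from the end, clamped at 0), else first occurrence overall
--         start = target if target >= 0 else max(len(query) + target, 0)
--         k = bisect_left(lst, start)
--         target = lst[k] if k < len(lst) else lst[0]
--         differ = idx - target
--         if abs(differ) >= 1:
--             count += 3
--         if tempdiffer == differ or target >= (idx - 1) - tempdiffer:
--             flag += 1
--         else:
--             flag = 0
--         tempdiffer = differ
--         count += abs(differ)
--         if flag >= 0.8 * len(temp):
--             return 0
--     return count
-- ===== Notes on version B (the rewrite author's own statement) =====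
-- stated objective: alternative
-- what changed: B precomputes a char->sorted-positions index of the (shorter) query string once and answers each 'first occurrence at index >= target' query with bisect_left plus a first-element fallback, instead of A's repeated str.find scans over the query.
import Mathlib
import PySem

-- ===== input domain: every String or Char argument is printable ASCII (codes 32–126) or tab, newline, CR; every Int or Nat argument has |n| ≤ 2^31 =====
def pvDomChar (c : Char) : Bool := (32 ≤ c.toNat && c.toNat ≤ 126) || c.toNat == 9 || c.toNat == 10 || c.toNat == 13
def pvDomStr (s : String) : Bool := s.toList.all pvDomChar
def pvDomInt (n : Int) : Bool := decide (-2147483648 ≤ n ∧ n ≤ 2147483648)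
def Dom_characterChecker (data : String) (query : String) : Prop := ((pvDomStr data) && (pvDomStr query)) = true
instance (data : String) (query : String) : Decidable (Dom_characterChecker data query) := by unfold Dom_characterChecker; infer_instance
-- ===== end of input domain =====

-- B replaces A's repeated str.find scans over the query by a char→positions index
-- built once and queried with bisect_left; objective: alternative (same result, different algorithm).

-- ===== PORT A =====
-- the loop 'for idx, char in enumerate(data)' with its persistent state;
-- 'flag >= 0.8*len(temp)' (integer flag vs float product) is ported in its exact
-- integer form '5*flag >= 4*len(temp)'

def chkLoopA (q : List Char) (L : Int) : List Char → Int → Int → Int → Int → Int → Int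
  | [], _idx, count, _flag, _tempdiffer, _target => count
  | c :: rest, idx, count, flag, tempdiffer, target =>
    let found := PySem.Chars.findFrom q [c] target
    let target' := if found ≠ -1 then found else PySem.Chars.find q [c]
    if target' = -1 then
      chkLoopA q L rest (idx + 1) (count + 5) 0 tempdiffer target'
    else
      let differ := idx - target'
      let count' := if 1 ≤ |differ| then count + 3 else count
      let flag' := if tempdiffer = differ ∨ ((idx - 1) - tempdiffer) ≤ target' then flag + 1 else 0
      let count'' := count' + |differ|
      if 4 * L ≤ 5 * flag' then 0
      else chkLoopA q L rest (idx + 1) count'' flag' differ target'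

def characterChecker (data : String) (query : String) : Int :=
  let temp := data
  let p := if PySem.Str.len data < PySem.Str.len query then (query, temp) else (data, query)
  chkLoopA p.2.toList (PySem.Str.len temp) p.1.toList 0 0 0 (-1) 0

-- ===== PORT B =====
-- 'for j, c in enumerate(query): pos.setdefault(c, []).append(j)'
def chkBuild : List Char → Int → PySem.Dict Char (List Int) → PySem.Dict Char (List Int)
  | [], _j, d => d
  | c :: rest, j, d => chkBuild rest (j + 1) (d.insert c (d.getD c [] ++ [j]))

-- B's main loop: dict lookup + bisect_left instead of str.find over the query
def chkLoopB (pos : PySem.Dict Char (List Int)) (m : Nat) (L : Int) :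
    List Char → Int → Int → Int → Int → Int → Int
  | [], _idx, count, _flag, _tempdiffer, _target => count
  | c :: rest, idx, count, flag, tempdiffer, target =>
    match pos.get? c with
    | none => chkLoopB pos m L rest (idx + 1) (count + 5) 0 tempdiffer (-1)
    | some lst =>
      let start := if 0 ≤ target then target else max ((m : Int) + target) 0
      let k := PySem.List.bisectLeft lst start
      let target' := if k < lst.length then lst.getD k 0 else lst.getD 0 0
      let differ := idx - target'
      let count' := if 1 ≤ |differ| then count + 3 else count
      let flag' := if tempdiffer = differ ∨ ((idx - 1) - tempdiffer) ≤ target' then flag + 1 else 0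
      let count'' := count' + |differ|
      if 4 * L ≤ 5 * flag' then 0
      else chkLoopB pos m L rest (idx + 1) count'' flag' differ target'

def characterChecker_alt (data : String) (query : String) : Int :=
  let temp := data
  let p := if PySem.Str.len data < PySem.Str.len query then (query, temp) else (data, query)
  let pos := chkBuild p.2.toList 0 PySem.Dict.empty
  chkLoopB pos p.2.toList.length (PySem.Str.len temp) p.1.toList 0 0 0 (-1) 0


-- ===== PRECONDITION & SPEC =====
def Spec_characterChecker (data : String) (query : String) (out : Int) : Prop := out = characterChecker_alt data query
instance (data : String) (query : String) (out : Int) : Decidable (Spec_characterChecker data query out) := by unfold Spec_characterChecker; infer_instance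

-- ===== CLAIM (what is proved, stated in full; the proofs are below) =====
def Claim_equal_characterChecker : Prop := ∀ (data : String) (query : String), Dom_characterChecker data query → Spec_characterChecker data query (characterChecker data query)

-- ===== LEMMAS AND PROOFS =====

-- the positions (offset by j) at which c occurs in q — B's index, and A's find, speak about these
def chkPos (q : List Char) (c : Char) (j : Int) : List Int :=
  match q with
  | [] => []
  | a :: r => (if a = c then [j] else []) ++ chkPos r c (j + 1)

theorem chkPos_mem (q : List Char) (c : Char) (j : Int) (x : Int) :
    x ∈ chkPos q c j ↔ ∃ i : Nat, i < q.length ∧ q[i]? = some c ∧ x = j + i := by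
  induction q generalizing j with
  | nil => simp [chkPos]
  | cons a r ih =>
    simp only [chkPos, List.mem_append]
    constructor
    · rintro (h | h)
      · refine ⟨0, by simp, ?_, ?_⟩
        · split at h <;> simp_all
        · split at h <;> simp_all
      · obtain ⟨i, hi, hg, hx⟩ := (ih (j + 1)).1 h
        exact ⟨i + 1, by simpa using hi, by simpa using hg, by omega⟩
    · rintro ⟨i, hi, hg, hx⟩
      cases i with
      | zero => left; simp_all
      | succ i =>
        right
        exact (ih (j + 1)).2 ⟨i, by simpa using hi, by simpa using hg, by omega⟩

theorem chkPos_pairwise (q : List Char) (c : Char) (j : Int) :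
    (chkPos q c j).Pairwise (· < ·) := by
  induction q generalizing j with
  | nil => simp [chkPos]
  | cons a r ih =>
    simp only [chkPos]
    rw [List.pairwise_append]
    refine ⟨by split <;> simp, ih (j + 1), ?_⟩
    intro x hx y hy
    have hx' : x = j := by split at hx <;> simp_all
    obtain ⟨i, _, _, hy'⟩ := (chkPos_mem r c (j + 1) y).1 hy
    omega

theorem chkBuild_get (q : List Char) (j : Int) (d : PySem.Dict Char (List Int)) (c : Char) :
    (chkBuild q j d).get? c =
      match d.get? c with
      | none => if chkPos q c j = [] then none else some (chkPos q c j)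
      | some l => some (l ++ chkPos q c j) := by
  induction q generalizing j d with
  | nil => cases h : d.get? c <;> simp [chkBuild, chkPos, h]
  | cons a r ih =>
    simp only [chkBuild]
    rw [ih]
    by_cases hca : c = a
    · subst hca
      rw [PySem.Dict.get?_insert_self]
      simp only [chkPos]
      cases h : d.get? c <;> simp [PySem.Dict.getD, h]
    · have hac : ¬ a = c := fun h' => hca h'.symm
      rw [PySem.Dict.get?_insert_of_ne _ _ hca]
      simp only [chkPos, if_neg hac]
      cases h : d.get? c <;> simp

theorem chk_singleton_infix (c : Char) (l : List Char) : [c] <:+: l ↔ c ∈ l := by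
  constructor
  · intro h; exact h.sublist.subset (by simp)
  · intro h
    obtain ⟨s, t, rfl⟩ := List.append_of_mem h
    exact ⟨s, t, by simp⟩

theorem chk_singleton_prefix (c : Char) (l : List Char) : [c] <+: l ↔ l.head? = some c := by
  cases l with
  | nil => simp
  | cons a r =>
    constructor
    · rintro ⟨t, ht⟩; simp at ht; simp [ht.1]
    · intro h; simp at h; exact ⟨r, by simp [h]⟩


theorem chk_find_eq (q : List Char) (c : Char) (k : Nat) (hk : k ≤ q.length) :
    PySem.Chars.findFrom q [c] (k : Int) =
      (if h : PySem.List.bisectLeft (chkPos q c 0) (k : Int) < (chkPos q c 0).length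
       then (chkPos q c 0)[PySem.List.bisectLeft (chkPos q c 0) (k : Int)]
       else -1) := by
  have hpw : (chkPos q c 0).Pairwise (· < ·) := chkPos_pairwise q c 0
  have hpw' : (chkPos q c 0).Pairwise (· ≤ ·) := hpw.imp (fun h => le_of_lt h)
  obtain ⟨hb1, hb2, hb3⟩ := PySem.List.bisectLeft_spec (chkPos q c 0) (k : Int) hpw'
  have hmem : ∀ x : Int, x ∈ chkPos q c 0 ↔ ∃ i : Nat, i < q.length ∧ q[i]? = some c ∧ x = i := by
    intro x; rw [chkPos_mem]; simp
  by_cases h : PySem.List.bisectLeft (chkPos q c 0) (k : Int) < (chkPos q c 0).length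
  · rw [dif_pos h]
    obtain ⟨i, hi, hgi, hei⟩ := (hmem _).1 (List.getElem_mem h)
    have hbk := hb3 _ h (le_refl _)
    have hki : k ≤ i := by rw [hei] at hbk; exact_mod_cast hbk
    have hinf : [c] <:+: q.drop k := by
      rw [chk_singleton_infix, List.mem_iff_getElem?]
      exact ⟨i - k, by rw [List.getElem?_drop, (by omega : k + (i - k) = i)]; exact hgi⟩
    have hne : PySem.Chars.findFrom q [c] (k : Int) ≠ -1 := by
      rw [Ne, PySem.Chars.findFrom_natCast_eq_neg_one_iff q [c] k hk]
      simpa using hinf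
    obtain ⟨hr1, hr2, hr3⟩ := PySem.Chars.findFrom_natCast_spec q [c] k hk hne
    have hri : PySem.Chars.findFrom q [c] (k : Int) ≤ (i : Int) := by
      by_contra hlt
      push Not at hlt
      refine hr3 i hki ?_ (by rw [chk_singleton_prefix, List.head?_drop]; exact hgi)
      omega
    have hq_r : q[(PySem.Chars.findFrom q [c] (k : Int)).toNat]? = some c := by
      have h2 := hr2; rw [chk_singleton_prefix, List.head?_drop] at h2; exact h2
    have hrlen : (PySem.Chars.findFrom q [c] (k : Int)).toNat < q.length := by
      by_contra hge; push Not at hge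
      rw [List.getElem?_eq_none hge] at hq_r; simp at hq_r
    have hrnn : 0 ≤ PySem.Chars.findFrom q [c] (k : Int) := le_trans (by positivity) hr1
    have hrin : PySem.Chars.findFrom q [c] (k : Int) ∈ chkPos q c 0 :=
      (hmem _).2 ⟨(PySem.Chars.findFrom q [c] (k : Int)).toNat, hrlen, hq_r, by omega⟩
    obtain ⟨j0, hj0, hj0e⟩ := List.mem_iff_getElem.1 hrin
    have hj0k : PySem.List.bisectLeft (chkPos q c 0) (k : Int) ≤ j0 := by
      by_contra hlt2
      push Not at hlt2
      have := hb2 j0 hj0 hlt2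
      rw [hj0e] at this
      omega
    have hle : (chkPos q c 0)[PySem.List.bisectLeft (chkPos q c 0) (k : Int)] ≤ (chkPos q c 0)[j0] := by
      rcases eq_or_lt_of_le hj0k with he | hlt3
      · exact le_of_eq (by congr 1)
      · exact le_of_lt (List.pairwise_iff_getElem.mp hpw _ _ h hj0 hlt3)
    rw [hj0e] at hle
    omega
  · rw [dif_neg h]
    rw [PySem.Chars.findFrom_natCast_eq_neg_one_iff q [c] k hk, chk_singleton_infix]
    intro hmem'
    rw [List.mem_iff_getElem?] at hmem'
    obtain ⟨i0, hi0⟩ := hmem'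
    rw [List.getElem?_drop] at hi0
    have hlen : k + i0 < q.length := by
      by_contra hge; push Not at hge
      rw [List.getElem?_eq_none hge] at hi0; simp at hi0
    have hin : ((k + i0 : Nat) : Int) ∈ chkPos q c 0 := (hmem _).2 ⟨k + i0, hlen, hi0, rfl⟩
    obtain ⟨j0, hj0, hj0e⟩ := List.mem_iff_getElem.1 hin
    have := hb2 j0 hj0 (by omega)
    rw [hj0e] at this
    push_cast at this
    omega


theorem chk_findFrom_neg_one (q : List Char) (sub : List Char) :
    PySem.Chars.findFrom q sub (-1) = PySem.Chars.findFrom q sub ((q.length - 1 : Nat) : Int) := by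
  rcases Nat.eq_zero_or_pos q.length with h0 | hpos
  · simp [PySem.Chars.findFrom, h0]
  · have h1 : ((q.length - 1 : Nat) : Int) = (q.length : Int) - 1 := by omega
    rw [h1]
    simp only [PySem.Chars.findFrom]
    rw [if_pos (by norm_num : (-1 : Int) < 0)]
    rw [if_neg (by omega : ¬ ((-1 : Int) + q.length < 0))]
    rw [if_neg (by omega : ¬ (((q.length : Int) - 1) < 0))]
    rw [if_neg (by omega : ¬ ((q.length : Int) < (q.length : Int) - 1))]
    rw [if_neg (by omega : ¬ ((q.length : Int) < -1 + (q.length : Int)))]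
    rw [(by ring : (-1 + (q.length : Int)) = ((q.length : Int) - 1))]

theorem chk_loop_eq (q : List Char) (L : Int) (xs : List Char) :
    ∀ (idx count flag tempdiffer target : Int),
    (target = -1 ∨ (0 ≤ target ∧ target.toNat ≤ q.length)) →
    chkLoopA q L xs idx count flag tempdiffer target
      = chkLoopB (chkBuild q 0 PySem.Dict.empty) q.length L xs idx count flag tempdiffer target := by
  induction xs with
  | nil => intro _ _ _ _ _ _; rfl
  | cons c rest ih =>
    intro idx count flag tempdiffer target ht
    have hget : (chkBuild q 0 PySem.Dict.empty).get? c =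
        if chkPos q c 0 = [] then none else some (chkPos q c 0) := by
      rw [chkBuild_get]; simp [PySem.Dict.get?_empty]
    have hmem : ∀ x : Int, x ∈ chkPos q c 0 ↔ ∃ i : Nat, i < q.length ∧ q[i]? = some c ∧ x = i := by
      intro x; rw [chkPos_mem]; simp
    have hpw' : (chkPos q c 0).Pairwise (· ≤ ·) :=
      (chkPos_pairwise q c 0).imp (fun h => le_of_lt h)
    -- the common clamped start index k0
    obtain ⟨k0, hk0le, hFF, hStart⟩ :
        ∃ k0 : Nat, k0 ≤ q.length ∧
          PySem.Chars.findFrom q [c] target = PySem.Chars.findFrom q [c] (k0 : Int) ∧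
          (if 0 ≤ target then target else max ((q.length : Int) + target) 0) = (k0 : Int) := by
      rcases ht with h | ⟨h1, h2⟩
      · refine ⟨q.length - 1, by omega, ?_, ?_⟩
        · rw [h]; exact chk_findFrom_neg_one q [c]
        · rw [h, if_neg (by omega)]
          rw [Int.max_def]; split_ifs <;> omega
      · refine ⟨target.toNat, h2, ?_, ?_⟩
        · congr 1
          omega
        · rw [if_pos h1]; omega
    by_cases hnil : chkPos q c 0 = []
    · -- character absent from query: both take the 'continue' branch
      have hfound : PySem.Chars.findFrom q [c] target = -1 := by
        rw [hFF, chk_find_eq q c k0 hk0le]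
        rw [dif_neg (by simp [hnil])]
      have hfind : PySem.Chars.find q [c] = -1 := by
        have h0 := chk_find_eq q c 0 (Nat.zero_le _)
        simp only [Nat.cast_zero] at h0
        rw [dif_neg (by simp [hnil])] at h0
        rw [PySem.Chars.findFrom_zero] at h0
        exact h0
      simp only [chkLoopA, chkLoopB, hget, if_pos hnil, hfound, hfind]
      norm_num
      exact ih (idx + 1) (count + 5) 0 tempdiffer (-1) (Or.inl rfl)
    · -- character present: both compute the same new target
      have h0lt : 0 < (chkPos q c 0).length := List.length_pos_of_ne_nil hnil
      have hgetv : ∀ (v : Int), v ∈ chkPos q c 0 → (0 ≤ v ∧ v.toNat ≤ q.length ∧ v ≠ -1) := by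
        intro v hv
        obtain ⟨i, hi, _, hei⟩ := (hmem v).1 hv
        refine ⟨by omega, by omega, by omega⟩
      have hfe := chk_find_eq q c k0 hk0le
      by_cases hkk : PySem.List.bisectLeft (chkPos q c 0) (k0 : Int) < (chkPos q c 0).length
      · -- an occurrence at index ≥ start exists
        rw [dif_pos hkk] at hfe
        have hv := hgetv _ (List.getElem_mem hkk)
        have htA : (if PySem.Chars.findFrom q [c] target ≠ -1
              then PySem.Chars.findFrom q [c] target else PySem.Chars.find q [c])
            = (chkPos q c 0)[PySem.List.bisectLeft (chkPos q c 0) (k0 : Int)] := by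
          rw [hFF, hfe, if_pos hv.2.2]
        have htB : (if PySem.List.bisectLeft (chkPos q c 0) (k0 : Int) < (chkPos q c 0).length
              then (chkPos q c 0).getD (PySem.List.bisectLeft (chkPos q c 0) (k0 : Int)) 0
              else (chkPos q c 0).getD 0 0)
            = (chkPos q c 0)[PySem.List.bisectLeft (chkPos q c 0) (k0 : Int)] := by
          rw [if_pos hkk, List.getD_eq_getElem _ _ hkk]
        simp only [chkLoopA, chkLoopB, hget, if_neg hnil, hStart, htA, htB]
        rw [if_neg hv.2.2]
        split_ifs <;>
          first
            | rfl
            | exact ih _ _ _ _ _ (Or.inr ⟨hv.1, hv.2.1⟩)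
      · -- no occurrence ≥ start: fall back to the first occurrence
        rw [dif_neg hkk] at hfe
        have hb0 : PySem.List.bisectLeft (chkPos q c 0) (0 : Int) = 0 := by
          by_contra hb
          obtain ⟨_, hb2, _⟩ := PySem.List.bisectLeft_spec (chkPos q c 0) (0 : Int) hpw'
          have hlt := hb2 0 h0lt (by omega)
          have := (hgetv _ (List.getElem_mem h0lt)).1
          omega
        have hfind : PySem.Chars.find q [c] = (chkPos q c 0)[0] := by
          have h0 := chk_find_eq q c 0 (Nat.zero_le _)
          simp only [Nat.cast_zero] at h0
          rw [dif_pos (by rw [hb0]; exact h0lt)] at h0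
          simp only [hb0] at h0
          rw [PySem.Chars.findFrom_zero] at h0
          exact h0
        have hv := hgetv _ (List.getElem_mem h0lt)
        have htA : (if PySem.Chars.findFrom q [c] target ≠ -1
              then PySem.Chars.findFrom q [c] target else PySem.Chars.find q [c])
            = (chkPos q c 0)[0] := by
          rw [hFF, hfe]
          simp [hfind]
        have htB : (if PySem.List.bisectLeft (chkPos q c 0) (k0 : Int) < (chkPos q c 0).length
              then (chkPos q c 0).getD (PySem.List.bisectLeft (chkPos q c 0) (k0 : Int)) 0
              else (chkPos q c 0).getD 0 0)
            = (chkPos q c 0)[0] := by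
          rw [if_neg hkk, List.getD_eq_getElem _ _ h0lt]
        simp only [chkLoopA, chkLoopB, hget, if_neg hnil, hStart, htA, htB]
        rw [if_neg hv.2.2]
        split_ifs <;>
          first
            | rfl
            | exact ih _ _ _ _ _ (Or.inr ⟨hv.1, hv.2.1⟩)

-- ===== VERDICT (by name: the statement is the Claim_ definition above) =====
theorem characterChecker_spec : Claim_equal_characterChecker := by
  intro data query _hdom
  unfold Spec_characterChecker
  simp only [characterChecker, characterChecker_alt]
  exact chk_loop_eq _ _ _ 0 0 0 (-1) 0 (Or.inr ⟨le_refl 0, by simp⟩)
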